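-- pv_equiv track=rewrite | github.com/sarbeshtiwari/arc-agi-3 | environment_files/cm10/cm10.py | _line_cells
-- ===== SOURCE A (Python) =====
-- from typing import Any, Dict, List, Optional, Set, Tuple
--
-- GridPos = Tuple[int, int]
--
-- def _line_cells(start: GridPos, end: GridPos) -> List[GridPos]:
--     row1, col1 = start
--     row2, col2 = end
--     cells: List[GridPos] = []
--     if row1 == row2:
--         step = 1 if col2 > col1 else -1
--         for col in range(col1 + step, col2, step):
--             cells.append((row1, col))
--     elif col1 == col2:
--         step = 1 if row2 > row1 else -1
--         for row in range(row1 + step, row2, step):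
--             cells.append((row, col1))
--     return cells
-- ===== SOURCE B (Python) =====
-- def _line_cells(start, end):
--     row1, col1 = start
--     r, c = end
--     if r != row1 and c != col1:
--         return []
--     rev = []
--     while True:
--         r += (r < row1) - (r > row1)
--         c += (c < col1) - (c > col1)
--         if (r, c) == (row1, col1):
--             return rev[::-1]
--         rev.append((r, c))
-- ===== Notes on version B (the rewrite author's own statement) =====
-- stated objective: alternative
-- what changed: Instead of A's two axis-specific forward range loops, B walks step by step from the END point back toward the start, accumulating the cells it passes in reverse order, and reverses the accumulator once when the walk reaches the start.
import Mathlib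
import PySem

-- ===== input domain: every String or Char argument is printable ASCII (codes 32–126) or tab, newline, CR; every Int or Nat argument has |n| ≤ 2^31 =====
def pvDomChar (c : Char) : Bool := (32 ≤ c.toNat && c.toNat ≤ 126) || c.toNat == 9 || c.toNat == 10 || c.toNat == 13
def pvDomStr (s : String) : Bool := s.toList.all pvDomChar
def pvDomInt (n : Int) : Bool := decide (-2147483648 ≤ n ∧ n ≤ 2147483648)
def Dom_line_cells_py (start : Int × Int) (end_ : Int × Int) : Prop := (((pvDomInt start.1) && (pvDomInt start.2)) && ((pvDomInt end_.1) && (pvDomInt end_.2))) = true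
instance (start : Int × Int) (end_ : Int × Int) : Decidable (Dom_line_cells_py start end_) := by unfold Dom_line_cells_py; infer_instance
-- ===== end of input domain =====

-- B walks from the end point back toward start, accumulating cells in reverse and reversing once at the end (objective: alternative).
-- ===== PORT A =====
def line_cells_py (start : Int × Int) (end_ : Int × Int) : List (Int × Int) :=
  let row1 := start.1; let col1 := start.2
  let row2 := end_.1; let col2 := end_.2
  if row1 = row2 then
    let step : Int := if col2 > col1 then 1 else -1
    (PySem.List.pyRange (col1 + step) col2 step).map (fun col => (row1, col))
  else if col1 = col2 then
    let step : Int := if row2 > row1 then 1 else -1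
    (PySem.List.pyRange (row1 + step) row2 step).map (fun row => (row, col1))
  else []

-- ===== PORT B =====
-- termination facts for pvWalk's walk toward the start (cited by decreasing_by)
lemma pvStep_eq (x t : Int) (h : x = t) :
    x + (if _ : x < t then 1 else 0) - (if _ : x > t then 1 else 0) = t := by
  subst h; simp

lemma pvStep_lt (x t : Int) (h : x ≠ t) :
    ((x + (if _ : x < t then 1 else 0) - (if _ : x > t then 1 else 0)) - t).natAbs < (x - t).natAbs := by
  rcases lt_or_gt_of_ne h with h' | h'
  · rw [dif_pos h', dif_neg (by omega)]; omega
  · rw [dif_neg (by omega), dif_pos h']; omega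

lemma pvStep_le (x t : Int) :
    ((x + (if _ : x < t then 1 else 0) - (if _ : x > t then 1 else 0)) - t).natAbs ≤ (x - t).natAbs := by
  by_cases h : x = t
  · subst h; simp
  · exact (pvStep_lt x t h).le

-- the while-loop of Source B: step (r, c) one cell toward (row1, col1); when the start
-- is reached return the reversed accumulator (rev[::-1]), else push the new cell
def pvWalk (row1 col1 : Int) (r c : Int) (rev : List (Int × Int)) : List (Int × Int) :=
  let r' := r + (if r < row1 then 1 else 0) - (if r > row1 then 1 else 0)
  let c' := c + (if c < col1 then 1 else 0) - (if c > col1 then 1 else 0)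
  if r' = row1 ∧ c' = col1 then rev.reverse
  else pvWalk row1 col1 r' c' (rev ++ [(r', c')])
termination_by ((r - row1).natAbs + (c - col1).natAbs)
decreasing_by
  rename_i h
  simp only [not_and] at h
  by_cases hr : r = row1
  · have h1 := pvStep_eq r row1 hr
    by_cases hc : c = col1
    · exact absurd (pvStep_eq c col1 hc) (h h1)
    · have h2 := pvStep_lt c col1 hc
      omega
  · have h1 := pvStep_lt r row1 hr
    have h2 := pvStep_le c col1
    omega

def line_cells_py_alt (start : Int × Int) (end_ : Int × Int) : List (Int × Int) :=
  let row1 := start.1; let col1 := start.2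
  if end_.1 ≠ row1 ∧ end_.2 ≠ col1 then []
  else pvWalk row1 col1 end_.1 end_.2 []

-- ===== PRECONDITION & SPEC =====
def Spec_line_cells_py (start : Int × Int) (end_ : Int × Int) (out : List (Int × Int)) : Prop := out = line_cells_py_alt start end_
instance (start : Int × Int) (end_ : Int × Int) (out : List (Int × Int)) : Decidable (Spec_line_cells_py start end_ out) := by unfold Spec_line_cells_py; infer_instance

-- ===== CLAIM =====
def Claim_equal_line_cells_py : Prop := ∀ (start : Int × Int) (end_ : Int × Int), Dom_line_cells_py start end_ → Spec_line_cells_py start end_ (line_cells_py start end_)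

-- ===== LEMMAS AND PROOFS =====

-- walking home along a row from the right of the start
lemma walk_right (r1 c1 : Int) (n : Nat) (rev : List (Int × Int)) :
    pvWalk r1 c1 r1 (c1 + n) rev
      = ((List.range (n - 1)).map (fun (k : Nat) => (r1, c1 + 1 + (k : Int)))) ++ rev.reverse := by
  induction n generalizing rev with
  | zero => rw [pvWalk.eq_def]; simp
  | succ m ih =>
    rw [pvWalk.eq_def]
    have hlt : ¬ (c1 + (↑(m+1):Int) < c1) := by push_cast; omega
    have hgt : c1 + (↑(m+1):Int) > c1 := by push_cast; omega
    simp only [gt_iff_lt, lt_irrefl, if_false, if_neg hlt, if_pos hgt, add_zero, sub_zero]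
    rcases Nat.eq_zero_or_pos m with hm | hm
    · subst hm
      rw [if_pos ⟨trivial, by push_cast; ring⟩]; simp
    · rw [if_neg (by push_cast; omega)]
      have hc : c1 + (↑(m+1):Int) - 1 = c1 + (m : Int) := by push_cast; ring
      rw [hc, ih]
      rw [show (m + 1 - 1 : Nat) = (m - 1) + 1 by omega, List.range_succ]
      have hx : (r1, c1 + 1 + ((m - 1 : Nat) : Int)) = (r1, c1 + (m : Int)) := by
        rw [show ((m - 1 : Nat) : Int) = (m : Int) - 1 by omega]; congr 1; ring
      simp only [List.map_append, List.map_cons, List.map_nil, List.reverse_append,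
        List.reverse_cons, List.reverse_nil, List.nil_append, List.append_assoc,
        List.singleton_append]
      rw [hx]

-- walking home along a row from the left of the start
lemma walk_left (r1 c1 : Int) (n : Nat) (rev : List (Int × Int)) :
    pvWalk r1 c1 r1 (c1 - n) rev
      = ((List.range (n - 1)).map (fun (k : Nat) => (r1, c1 - 1 - (k : Int)))) ++ rev.reverse := by
  induction n generalizing rev with
  | zero => rw [pvWalk.eq_def]; simp
  | succ m ih =>
    rw [pvWalk.eq_def]
    have hlt : c1 - (↑(m+1):Int) < c1 := by push_cast; omega
    have hgt : ¬ (c1 - (↑(m+1):Int) > c1) := by push_cast; omega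
    simp only [gt_iff_lt, lt_irrefl, if_false, if_pos hlt, if_neg hgt, add_zero, sub_zero]
    rcases Nat.eq_zero_or_pos m with hm | hm
    · subst hm
      rw [if_pos ⟨trivial, by push_cast; ring⟩]; simp
    · rw [if_neg (by push_cast; omega)]
      have hc : c1 - (↑(m+1):Int) + 1 = c1 - (m : Int) := by push_cast; ring
      rw [hc, ih]
      rw [show (m + 1 - 1 : Nat) = (m - 1) + 1 by omega, List.range_succ]
      have hx : (r1, c1 - 1 - ((m - 1 : Nat) : Int)) = (r1, c1 - (m : Int)) := by
        rw [show ((m - 1 : Nat) : Int) = (m : Int) - 1 by omega]; congr 1; ring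
      simp only [List.map_append, List.map_cons, List.map_nil, List.reverse_append,
        List.reverse_cons, List.reverse_nil, List.nil_append, List.append_assoc,
        List.singleton_append]
      rw [hx]

-- walking home along a column from below the start
lemma walk_up (r1 c1 : Int) (n : Nat) (rev : List (Int × Int)) :
    pvWalk r1 c1 (r1 + n) c1 rev
      = ((List.range (n - 1)).map (fun (k : Nat) => (r1 + 1 + (k : Int), c1))) ++ rev.reverse := by
  induction n generalizing rev with
  | zero => rw [pvWalk.eq_def]; simp
  | succ m ih =>
    rw [pvWalk.eq_def]
    have hlt : ¬ (r1 + (↑(m+1):Int) < r1) := by push_cast; omega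
    have hgt : r1 + (↑(m+1):Int) > r1 := by push_cast; omega
    simp only [gt_iff_lt, lt_irrefl, if_false, if_neg hlt, if_pos hgt, add_zero, sub_zero]
    rcases Nat.eq_zero_or_pos m with hm | hm
    · subst hm
      rw [if_pos ⟨by push_cast; ring, trivial⟩]; simp
    · rw [if_neg (by push_cast; omega)]
      have hr : r1 + (↑(m+1):Int) - 1 = r1 + (m : Int) := by push_cast; ring
      rw [hr, ih]
      rw [show (m + 1 - 1 : Nat) = (m - 1) + 1 by omega, List.range_succ]
      have hx : (r1 + 1 + ((m - 1 : Nat) : Int), c1) = (r1 + (m : Int), c1) := by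
        rw [show ((m - 1 : Nat) : Int) = (m : Int) - 1 by omega]; congr 1; ring
      simp only [List.map_append, List.map_cons, List.map_nil, List.reverse_append,
        List.reverse_cons, List.reverse_nil, List.nil_append, List.append_assoc,
        List.singleton_append]
      rw [hx]

-- walking home along a column from above the start
lemma walk_down (r1 c1 : Int) (n : Nat) (rev : List (Int × Int)) :
    pvWalk r1 c1 (r1 - n) c1 rev
      = ((List.range (n - 1)).map (fun (k : Nat) => (r1 - 1 - (k : Int), c1))) ++ rev.reverse := by
  induction n generalizing rev with
  | zero => rw [pvWalk.eq_def]; simp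
  | succ m ih =>
    rw [pvWalk.eq_def]
    have hlt : r1 - (↑(m+1):Int) < r1 := by push_cast; omega
    have hgt : ¬ (r1 - (↑(m+1):Int) > r1) := by push_cast; omega
    simp only [gt_iff_lt, lt_irrefl, if_false, if_pos hlt, if_neg hgt, add_zero, sub_zero]
    rcases Nat.eq_zero_or_pos m with hm | hm
    · subst hm
      rw [if_pos ⟨by push_cast; ring, trivial⟩]; simp
    · rw [if_neg (by push_cast; omega)]
      have hr : r1 - (↑(m+1):Int) + 1 = r1 - (m : Int) := by push_cast; ring
      rw [hr, ih]
      rw [show (m + 1 - 1 : Nat) = (m - 1) + 1 by omega, List.range_succ]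
      have hx : (r1 - 1 - ((m - 1 : Nat) : Int), c1) = (r1 - (m : Int), c1) := by
        rw [show ((m - 1 : Nat) : Int) = (m : Int) - 1 by omega]; congr 1; ring
      simp only [List.map_append, List.map_cons, List.map_nil, List.reverse_append,
        List.reverse_cons, List.reverse_nil, List.nil_append, List.append_assoc,
        List.singleton_append]
      rw [hx]

-- ===== VERDICT =====
theorem line_cells_py_spec : Claim_equal_line_cells_py := by
  intro start end_ _
  obtain ⟨row1, col1⟩ := start
  obtain ⟨row2, col2⟩ := end_
  unfold Spec_line_cells_py line_cells_py line_cells_py_alt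
  simp only
  rcases lt_trichotomy row1 row2 with hr | hr | hr
  · rcases lt_trichotomy col1 col2 with hc | hc | hc
    · simp [hr.ne, hr.ne', hc.ne, hc.ne']
    · subst hc
      rw [if_neg hr.ne, if_pos rfl, if_pos (show row2 > row1 from hr),
          if_neg (show ¬ (row2 ≠ row1 ∧ col1 ≠ col1) by simp)]
      have hn : row2 = row1 + (((row2 - row1).toNat : Nat) : Int) := by omega
      rw [hn, walk_up, PySem.List.pyRange_one]
      rw [show (row1 + (((row2 - row1).toNat : Nat) : Int) - (row1 + 1)).toNat = (row2 - row1).toNat - 1 by omega]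
      simp only [List.map_map, List.reverse_nil, List.append_nil]
      exact List.map_congr_left (fun k _ => by simp; try ring)
    · simp [hr.ne, hr.ne', hc.ne, hc.ne']
  · subst hr
    rcases lt_trichotomy col1 col2 with hc | hc | hc
    · rw [if_pos rfl, if_pos (show col2 > col1 from hc),
          if_neg (show ¬ (row1 ≠ row1 ∧ col2 ≠ col1) by simp)]
      have hn : col2 = col1 + (((col2 - col1).toNat : Nat) : Int) := by omega
      rw [hn, walk_right, PySem.List.pyRange_one]
      rw [show (col1 + (((col2 - col1).toNat : Nat) : Int) - (col1 + 1)).toNat = (col2 - col1).toNat - 1 by omega]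
      simp only [List.map_map, List.reverse_nil, List.append_nil]
      exact List.map_congr_left (fun k _ => by simp; try ring)
    · subst hc
      rw [if_pos rfl, if_neg (show ¬ (col1 > col1) from lt_irrefl col1),
          if_neg (show ¬ (row1 ≠ row1 ∧ col1 ≠ col1) by simp),
          PySem.List.pyRange_neg_one_eq_nil (by omega), pvWalk.eq_def]
      simp
    · rw [if_pos rfl, if_neg (show ¬ (col2 > col1) from not_lt.mpr hc.le),
          if_neg (show ¬ (row1 ≠ row1 ∧ col2 ≠ col1) by simp)]
      have hn : col2 = col1 - (((col1 - col2).toNat : Nat) : Int) := by omega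
      rw [hn, walk_left, PySem.List.pyRange_neg_one]
      rw [show (col1 + -1 - (col1 - (((col1 - col2).toNat : Nat) : Int))).toNat = (col1 - col2).toNat - 1 by omega]
      simp only [List.map_map, List.reverse_nil, List.append_nil]
      exact List.map_congr_left (fun k _ => by simp; try ring)
  · rcases lt_trichotomy col1 col2 with hc | hc | hc
    · simp [hr.ne, hr.ne', hc.ne, hc.ne']
    · subst hc
      rw [if_neg hr.ne', if_pos rfl, if_neg (show ¬ (row2 > row1) from not_lt.mpr hr.le),
          if_neg (show ¬ (row2 ≠ row1 ∧ col1 ≠ col1) by simp)]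
      have hn : row2 = row1 - (((row1 - row2).toNat : Nat) : Int) := by omega
      rw [hn, walk_down, PySem.List.pyRange_neg_one]
      rw [show (row1 + -1 - (row1 - (((row1 - row2).toNat : Nat) : Int))).toNat = (row1 - row2).toNat - 1 by omega]
      simp only [List.map_map, List.reverse_nil, List.append_nil]
      exact List.map_congr_left (fun k _ => by simp; try ring)
    · simp [hr.ne, hr.ne', hc.ne, hc.ne']
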